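-- pv_equiv track=rewrite | github.com/981377660LMT/algorithm-study | 8_heap/经典题/维护两个event/2054. 两个最好的不重叠活动.py | maxKEvents
-- ===== SOURCE A (Python) =====
-- from bisect import bisect_right
-- from typing import List, Tuple
--
-- def max(x, y):
--     if x > y:
--         return x
--     return y
--
-- def maxKEvents(events: List[Tuple[int, int, int]], k: int) -> int:
--     n = len(events)
--     events = sorted(events, key=lambda x: x[1])
--     dp = [[0] * (k + 1) for _ in range(n + 1)]
--     for i in range(n):
--         start, _, score = events[i]
--         dp[i + 1] = dp[i][:]
--         prePos = bisect_right(events, start - 1, key=lambda x: x[1]) - 1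
--         for j in range(1, k + 1):
--             dp[i + 1][j] = max(dp[i + 1][j], score + dp[prePos + 1][j - 1])
--     return dp[n][k]
-- ===== SOURCE B (Python) =====
-- from bisect import bisect_right
-- from typing import List, Tuple
--
--
-- def maxKEvents(events: List[Tuple[int, int, int]], k: int) -> int:
--     es = sorted(events, key=lambda e: e[1])
--     n = len(es)
--     ends = [e[1] for e in es]
--     # best(i, j) = top score reachable from the first i events (in end order)
--     # with at most j picks:
--     #   best(i, j) = max(best(i - 1, j), score_i + best(chain_i, j - 1)),
--     # computed on demand, top-down: an explicit work stack drives the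
--     # recursion (no recursion limit), a dict memoises the states reached.
--     memo = {}
--     stack = [(n, k)]
--     while stack:
--         i, j = stack[-1]
--         if i == 0 or j <= 0:
--             memo[(i, j)] = 0
--             stack.pop()
--             continue
--         start, _, score = es[i - 1]
--         p = bisect_right(ends, start - 1)
--         q = p if p <= i else 0  # chainable prefix of the i - 1 earlier events (empty on overshoot)
--         if (i - 1, j) not in memo:
--             stack.append((i - 1, j))
--         elif (q, j - 1) not in memo:
--             stack.append((q, j - 1))
--         else:
--             take = score + memo[(q, j - 1)]
--             skip = memo[(i - 1, j)]
--             memo[(i, j)] = take if take > skip else skip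
--             stack.pop()
--     return memo[(n, k)]
-- ===== Notes on version B (the rewrite author's own statement) =====
-- stated objective: alternative
-- what changed: Replaces A's bottom-up (n+1)x(k+1) table (a copied row plus an inner loop over every budget j for each event) by top-down on-demand memoisation: an explicit work stack drives the recursion best(i,j)=max(best(i-1,j), score+best(chain,j-1)) and a dict stores exactly the states reached.
import Mathlib
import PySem

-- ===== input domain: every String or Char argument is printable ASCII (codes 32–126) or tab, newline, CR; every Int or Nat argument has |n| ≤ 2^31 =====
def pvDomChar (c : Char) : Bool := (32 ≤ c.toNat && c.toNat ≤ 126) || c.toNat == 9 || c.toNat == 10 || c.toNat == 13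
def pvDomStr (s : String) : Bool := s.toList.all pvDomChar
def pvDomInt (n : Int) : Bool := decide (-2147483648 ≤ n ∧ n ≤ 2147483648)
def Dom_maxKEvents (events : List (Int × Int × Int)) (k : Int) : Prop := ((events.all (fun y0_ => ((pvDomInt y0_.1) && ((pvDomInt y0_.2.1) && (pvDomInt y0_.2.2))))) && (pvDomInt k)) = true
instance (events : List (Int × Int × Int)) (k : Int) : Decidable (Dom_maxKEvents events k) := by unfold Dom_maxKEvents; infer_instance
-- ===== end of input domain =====

-- B replaces A's bottom-up (n+1)×(k+1) table (built row by row with an inner loop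
-- over all k budgets per event) by top-down on-demand evaluation of the chain DP:
-- an explicit work stack drives the recursion best(i,j) and a dictionary memoises
-- exactly the states reached.  Objective: alternative decomposition, same cost.

-- ===== PORT A =====
-- Python's module-level max(x, y)
def pymax (x y : Int) : Int := if x > y then x else y

-- bisect.bisect_right(xs, v, key=f) compares key(xs[mid]) against v along the binary
-- search, exactly as bisect_right does on the key-projected list (exact on all inputs).
def bisectKeyEnd (es : List (Int × Int × Int)) (v : Int) : Nat :=
  PySem.List.bisectRight (es.map (fun x => x.2.1)) v

-- body of A's inner `for j in range(1, k + 1)` loop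
def innerA (score : Int) (prePos : Int) (i : Nat) (dp : List (List Int)) (j : Int) : List (List Int) :=
  PySem.List.pySetD dp ((i : Int) + 1)
    (PySem.List.pySetD (PySem.List.pyGetD dp ((i : Int) + 1) []) j
      (pymax (PySem.List.pyGetD (PySem.List.pyGetD dp ((i : Int) + 1) []) j 0)
        (score + PySem.List.pyGetD (PySem.List.pyGetD dp (prePos + 1) []) (j - 1) 0)))

-- body of A's outer `for i in range(n)` loop
def outerA (es : List (Int × Int × Int)) (k : Int) (dp : List (List Int)) (i : Nat) : List (List Int) :=
  let start := (PySem.List.pyGetD es (i : Int) (0, 0, 0)).1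
  let score := (PySem.List.pyGetD es (i : Int) (0, 0, 0)).2.2
  let dp := PySem.List.pySetD dp ((i : Int) + 1) (PySem.List.pyGetD dp (i : Int) [])
  let prePos : Int := (bisectKeyEnd es (start - 1) : Int) - 1
  (PySem.List.pyRange 1 (k + 1)).foldl (innerA score prePos i) dp

def maxKEvents (events : List (Int × Int × Int)) (k : Int) : Int :=
  let n := events.length
  let es := PySem.List.sorted events (fun x => x.2.1)
  let dp := (List.range n).foldl (outerA es k)
    (List.replicate (n + 1) (List.replicate (k + 1).toNat 0))
  PySem.List.pyGetD (PySem.List.pyGetD dp (n : Int) []) k 0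

-- ===== PORT B =====
-- Source B's `while stack:` loop.  The Python loop terminates on every input; the
-- fuel argument only makes the same iteration structurally recursive (the
-- wrapper below passes enough fuel, proved in bLoop_good / alt_eq_F).
-- Stack top = list head; memo maps a state (i, j) to best(i, j).
def bLoop (es : List (Int × Int × Int)) (ends : List Int)
    (fuel : Nat) (stack : List (Nat × Int)) (memo : PySem.Dict (Nat × Int) Int) :
    PySem.Dict (Nat × Int) Int :=
  match fuel, stack with
  | 0, _ => memo
  | _, [] => memo
  | fuel + 1, (i, j) :: rest =>
    if i = 0 ∨ j ≤ 0 then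
      bLoop es ends fuel rest (memo.insert (i, j) 0)
    else
      let e := PySem.List.pyGetD es ((i : Int) - 1) (0, 0, 0)
      let p := PySem.List.bisectRight ends (e.1 - 1)
      let q := if p ≤ i then p else 0
      if memo.contains (i - 1, j) = false then
        bLoop es ends fuel ((i - 1, j) :: (i, j) :: rest) memo
      else if memo.contains (q, j - 1) = false then
        bLoop es ends fuel ((q, j - 1) :: (i, j) :: rest) memo
      else
        let take := e.2.2 + memo.getD (q, j - 1) 0
        let skip := memo.getD (i - 1, j) 0
        bLoop es ends fuel rest (memo.insert (i, j) (if take > skip then take else skip))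

def maxKEvents_alt (events : List (Int × Int × Int)) (k : Int) : Int :=
  let es := PySem.List.sorted events (fun e => e.2.1)
  let n := es.length
  let ends := es.map (fun e => e.2.1)
  let S := (n + 1) * (k.toNat + 1) + 1
  let memo := bLoop es ends ((S + 2) * (S + 2)) [(n, k)] PySem.Dict.empty
  memo.getD (n, k) 0

-- ===== PRECONDITION & SPEC =====
-- For k < 0 the Python A indexes dp[n][k] on an empty row and raises IndexError.
def Pre_maxKEvents (events : List (Int × Int × Int)) (k : Int) : Prop := 0 ≤ k
instance (events : List (Int × Int × Int)) (k : Int) : Decidable (Pre_maxKEvents events k) := by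
  unfold Pre_maxKEvents; infer_instance

def pvWitness_maxKEvents : (List (Int × Int × Int)) × Int := ([(1, 2, 4), (3, 4, 4), (0, 5, 9)], 2)

def Spec_maxKEvents (events : List (Int × Int × Int)) (k : Int) (out : Int) : Prop := out = maxKEvents_alt events k
instance (events : List (Int × Int × Int)) (k : Int) (out : Int) : Decidable (Spec_maxKEvents events k out) := by unfold Spec_maxKEvents; infer_instance

-- ===== CLAIM (what is proved, stated in full; the proofs are below) =====
def Claim_equal_maxKEvents : Prop := ∀ (events : List (Int × Int × Int)) (k : Int), Dom_maxKEvents events k → Pre_maxKEvents events k → Spec_maxKEvents events k (maxKEvents events k)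

-- ===== LEMMAS AND PROOFS =====

-- the common mathematical recurrence both programs compute
def stF (es : List (Int × Int × Int)) (i : Nat) : Int := (es.getD i (0, 0, 0)).1
def scF (es : List (Int × Int × Int)) (i : Nat) : Int := (es.getD i (0, 0, 0)).2.2
def pF (es : List (Int × Int × Int)) (i : Nat) : Nat := bisectKeyEnd es (stF es i - 1)
def qF (es : List (Int × Int × Int)) (i : Nat) : Nat := if pF es i ≤ i + 1 then pF es i else 0

def F (es : List (Int × Int × Int)) : Nat → Nat → Int
  | 0, _ => 0
  | _ + 1, 0 => 0
  | i + 1, j + 1 => pymax (F es i (j + 1)) (scF es i + F es (qF es i) j)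
termination_by i j => (j, i)
decreasing_by
  · exact Prod.Lex.right _ (Nat.lt_succ_self i)
  · exact Prod.Lex.left _ _ (Nat.lt_succ_self j)

lemma F_left_zero (es : List (Int × Int × Int)) (j : Nat) : F es 0 j = 0 := by
  cases j <;> simp [F]

lemma F_right_zero (es : List (Int × Int × Int)) (i : Nat) : F es i 0 = 0 := by
  cases i <;> simp [F]

lemma F_succ (es : List (Int × Int × Int)) (i j : Nat) :
    F es (i + 1) (j + 1) = pymax (F es i (j + 1)) (scF es i + F es (qF es i) j) := by
  simp [F]

-- list plumbing helpers
lemma replicate_eq_map_range {α : Type} (N : Nat) (a : α) :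
    List.replicate N a = (List.range N).map (fun _ => a) := by
  simp [List.map_const']

lemma map_range_congr {α : Type} (N : Nat) (f g : Nat → α)
    (h : ∀ t, t < N → f t = g t) : (List.range N).map f = (List.range N).map g := by
  apply List.map_congr_left
  intro t ht
  exact h t (List.mem_range.mp ht)

lemma set_map_range {α : Type} (N : Nat) (f : Nat → α) (i : Nat) (v : α) :
    ((List.range N).map f).set i v = (List.range N).map (fun t => if t = i then v else f t) := by
  apply List.ext_getElem
  · simp
  · intro t h1 h2
    simp only [List.getElem_set, List.getElem_map, List.getElem_range]
    by_cases h : i = t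
    · subst h; simp
    · simp [h, Ne.symm h]

-- row / table abstractions for A's table
def zrow (K : Nat) : List Int := List.replicate (K + 1) 0
def rowF (es : List (Int × Int × Int)) (K t : Nat) : List Int :=
  (List.range (K + 1)).map (fun j => F es t j)
def mixRow (es : List (Int × Int × Int)) (K m j' : Nat) : List Int :=
  (List.range (K + 1)).map (fun u => if u ≤ j' then F es (m + 1) u else F es m u)
def dpSt (es : List (Int × Int × Int)) (K n m : Nat) : List (List Int) :=
  (List.range (n + 1)).map (fun t => if t ≤ m then rowF es K t else zrow K)
def mixSt (es : List (Int × Int × Int)) (K n m j' : Nat) : List (List Int) :=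
  (List.range (n + 1)).map (fun t =>
    if t ≤ m then rowF es K t else if t = m + 1 then mixRow es K m j' else zrow K)

lemma rowF_zero (es : List (Int × Int × Int)) (K : Nat) : rowF es K 0 = zrow K := by
  unfold rowF zrow
  rw [replicate_eq_map_range]
  exact map_range_congr _ _ _ (fun t _ => F_left_zero es t)

lemma dpSt_getD (es : List (Int × Int × Int)) (K n m t : Nat) (ht : t < n + 1) :
    (dpSt es K n m).getD t [] = if t ≤ m then rowF es K t else zrow K := by
  unfold dpSt; rw [PySem.List.getD_map_range _ _ _ _ ht]

lemma mixRow_zero (es : List (Int × Int × Int)) (K m : Nat) :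
    mixRow es K m 0 = rowF es K m := by
  unfold mixRow rowF
  apply map_range_congr
  intro u _
  match u with
  | 0 => simp [F_right_zero]
  | v + 1 => simp

lemma mixRow_full (es : List (Int × Int × Int)) (K m : Nat) :
    mixRow es K m K = rowF es K (m + 1) := by
  unfold mixRow rowF
  apply map_range_congr
  intro u hu
  rw [if_pos (by omega)]

lemma mixSt_getD (es : List (Int × Int × Int)) (K n m j' t : Nat) (ht : t < n + 1) :
    (mixSt es K n m j').getD t [] =
      (if t ≤ m then rowF es K t else if t = m + 1 then mixRow es K m j' else zrow K) := by
  unfold mixSt; rw [PySem.List.getD_map_range _ _ _ _ ht]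

lemma zrow_getD (K u : Nat) : (zrow K).getD u 0 = 0 := by
  unfold zrow
  by_cases h : u < K + 1
  · rw [List.getD_eq_getElem _ _ (by simpa using h)]; simp
  · apply List.getD_eq_default; simp; omega

-- A's inner loop body sends the mixed state for j' to the mixed state for j' + 1.
lemma innerA_on_mix (es : List (Int × Int × Int)) (K n m j' : Nat)
    (hm : m < n) (hj : j' < K) :
    innerA (scF es m) ((pF es m : Int) - 1) m (mixSt es K n m j') ((j' : Int) + 1) =
      mixSt es K n m (j' + 1) := by
  have hc1 : ((m : Int) + 1) = ((m + 1 : Nat) : Int) := by push_cast; ring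
  have hc2 : ((j' : Int) + 1) = ((j' + 1 : Nat) : Int) := by push_cast; ring
  have hc3 : ((j' : Int) + 1 - 1) = ((j' : Nat) : Int) := by ring
  have hc4 : ((pF es m : Int) - 1 + 1) = ((pF es m : Nat) : Int) := by ring
  have hrow : PySem.List.pyGetD (mixSt es K n m j') ((m : Int) + 1) [] = mixRow es K m j' := by
    rw [hc1, PySem.List.pyGetD_natCast, mixSt_getD es K n m j' (m + 1) (by omega)]
    simp
  have hget : PySem.List.pyGetD (mixRow es K m j') ((j' : Int) + 1) 0 = F es m (j' + 1) := by
    rw [hc2, PySem.List.pyGetD_natCast]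
    unfold mixRow
    rw [PySem.List.getD_map_range _ _ _ _ (by omega)]
    simp
  have hpre : PySem.List.pyGetD
      (PySem.List.pyGetD (mixSt es K n m j') ((pF es m : Int) - 1 + 1) []) ((j' : Int) + 1 - 1) 0
        = F es (qF es m) j' := by
    rw [hc3, hc4, PySem.List.pyGetD_natCast, PySem.List.pyGetD_natCast]
    by_cases h1 : pF es m ≤ m
    · rw [mixSt_getD es K n m j' _ (by omega), if_pos h1]
      unfold rowF
      rw [PySem.List.getD_map_range _ _ _ _ (by omega)]
      unfold qF
      rw [if_pos (by omega)]
    · by_cases h2 : pF es m = m + 1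
      · rw [mixSt_getD es K n m j' _ (by omega), if_neg h1, if_pos h2]
        unfold mixRow
        rw [PySem.List.getD_map_range _ _ _ _ (by omega)]
        unfold qF
        rw [if_pos (by omega), h2]
        simp
      · have hq : qF es m = 0 := by unfold qF; rw [if_neg (by omega)]
        rw [hq, F_left_zero]
        by_cases h3 : pF es m < n + 1
        · rw [mixSt_getD es K n m j' _ h3, if_neg h1, if_neg h2, zrow_getD]
        · rw [show (mixSt es K n m j').getD (pF es m) [] = [] from
            List.getD_eq_default _ _
              (by unfold mixSt; simp only [List.length_map, List.length_range]; omega)]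
          rfl
  unfold innerA
  rw [hrow, hget, hpre, hc2, PySem.List.pySetD_natCast, hc1, PySem.List.pySetD_natCast]
  have hv : pymax (F es m (j' + 1)) (scF es m + F es (qF es m) j') = F es (m + 1) (j' + 1) :=
    (F_succ es m j').symm
  rw [hv]
  unfold mixRow
  rw [set_map_range]
  unfold mixSt
  rw [set_map_range]
  apply map_range_congr
  intro t ht
  by_cases h : t = m + 1
  · subst h
    rw [if_pos rfl, if_neg (by omega), if_pos rfl]
    apply map_range_congr
    intro u hu
    by_cases h2 : u = j' + 1
    · subst h2; rw [if_pos rfl, if_pos (by omega)]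
    · rw [if_neg h2]
      by_cases h3 : u ≤ j'
      · rw [if_pos h3, if_pos (by omega)]
      · rw [if_neg h3, if_neg (by omega)]
  · simp [h]

-- running A's inner loop from the freshly copied row gives the fully mixed row
lemma A_inner_range (es : List (Int × Int × Int)) (K n m : Nat) (hm : m < n) :
    ∀ j', j' ≤ K →
      (PySem.List.pyRange 1 ((j' : Int) + 1)).foldl
        (innerA (scF es m) ((pF es m : Int) - 1) m) (mixSt es K n m 0) = mixSt es K n m j' := by
  intro j'
  induction j' with
  | zero =>
    intro _
    rw [show ((0 : Nat) : Int) + 1 = 1 by norm_num, PySem.List.pyRange_one_eq_nil (le_refl 1)]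
    rfl
  | succ j ih =>
    intro h
    rw [show ((j + 1 : Nat) : Int) + 1 = ((j : Int) + 1) + 1 by push_cast; ring,
      PySem.List.pyRange_one_succ_right (by omega), List.foldl_append, ih (by omega)]
    simp only [List.foldl_cons, List.foldl_nil]
    exact innerA_on_mix es K n m j hm (by omega)

lemma outerA_on_dpSt (es : List (Int × Int × Int)) (K n m : Nat) (hm : m < n) :
    outerA es (K : Int) (dpSt es K n m) m = dpSt es K n (m + 1) := by
  simp only [outerA]
  rw [show ((m : Int) + 1) = ((m + 1 : Nat) : Int) by push_cast; ring,
    PySem.List.pySetD_natCast, PySem.List.pyGetD_natCast, PySem.List.pyGetD_natCast,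
    dpSt_getD es K n m m (by omega), if_pos (le_refl m)]
  have hset : (dpSt es K n m).set (m + 1) (rowF es K m) = mixSt es K n m 0 := by
    unfold dpSt
    rw [set_map_range]
    unfold mixSt
    apply map_range_congr
    intro t _
    by_cases h : t = m + 1
    · subst h
      simp [show ¬(m + 1 ≤ m) from by omega, mixRow_zero]
    · simp [h]
  rw [hset]
  have hb : bisectKeyEnd es ((es.getD m (0, 0, 0)).1 - 1) = pF es m := rfl
  rw [hb]
  have hsc : (es.getD m (0, 0, 0)).2.2 = scF es m := rfl
  rw [hsc, A_inner_range es K n m hm K (le_refl K)]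
  unfold mixSt dpSt
  apply map_range_congr
  intro t _
  by_cases h1 : t ≤ m
  · rw [if_pos h1, if_pos (by omega)]
  · by_cases h2 : t = m + 1
    · subst h2
      rw [if_neg h1, if_pos rfl, if_pos (le_refl _), mixRow_full]
    · rw [if_neg h1, if_neg h2, if_neg (by omega)]

lemma A_outer_range (es : List (Int × Int × Int)) (K n : Nat) (hn : n = es.length) :
    ∀ m, m ≤ n → (List.range m).foldl (outerA es (K : Int)) (dpSt es K n 0) = dpSt es K n m := by
  intro m
  induction m with
  | zero => intro _; rfl
  | succ m ih =>
    intro h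
    rw [List.range_succ, List.foldl_append, ih (by omega)]
    simp only [List.foldl_cons, List.foldl_nil]
    exact outerA_on_dpSt es K n m (by omega)

-- ===== B-side proof machinery: the stack machine computes F =====

-- rank of a state in the dependency order (children of a state have smaller rank)
def stRank (n : Nat) (s : Nat × Int) : Nat := s.2.toNat * (n + 1) + s.1

-- states the loop can reach from the root (n, k)
def StOK (n : Nat) (k : Int) (s : Nat × Int) : Prop :=
  s = (n, k) ∨ (s.1 ≤ n ∧ 0 ≤ s.2 ∧ s.2 ≤ k)

def allStates (n : Nat) (k : Int) : List (Nat × Int) :=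
  (n, k) :: (List.range (n + 1)).flatMap
    (fun i => (List.range (k.toNat + 1)).map (fun jn => (i, Int.ofNat jn)))

def unmem (n : Nat) (k : Int) (memo : PySem.Dict (Nat × Int) Int) : Nat :=
  ((allStates n k).filter (fun s => (memo.get? s).isNone)).length

-- the loop invariant
def BInv (es : List (Int × Int × Int)) (n : Nat) (k : Int)
    (stack : List (Nat × Int)) (memo : PySem.Dict (Nat × Int) Int) : Prop :=
  List.Pairwise (fun a b => stRank n a < stRank n b) stack ∧
  (∀ s ∈ stack, memo.get? s = none) ∧
  (∀ s ∈ stack, StOK n k s) ∧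
  (∀ s v, memo.get? s = some v → v = F es s.1 s.2.toNat) ∧
  ((n, k) ∈ stack ∨ (memo.get? (n, k)).isSome)

lemma mem_allStates_of_StOK (n : Nat) (k : Int) (s : Nat × Int) (h : StOK n k s) :
    s ∈ allStates n k := by
  rcases h with h | ⟨h1, h2, h3⟩
  · exact h ▸ List.mem_cons_self
  · cases s with
    | mk a b =>
      simp only at h1 h2 h3
      refine List.mem_cons_of_mem _ ?_
      simp only [List.mem_flatMap, List.mem_map, List.mem_range]
      exact ⟨a, by omega, b.toNat, by omega, by rw [show Int.ofNat b.toNat = b by simp only [Int.ofNat_eq_natCast]; omega]⟩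

lemma allStates_length (n : Nat) (k : Int) :
    (allStates n k).length = (n + 1) * (k.toNat + 1) + 1 := by
  simp only [allStates, List.length_cons, List.length_flatMap]
  have h : (List.range (n + 1)).map
      (fun i => ((List.range (k.toNat + 1)).map (fun jn => (i, Int.ofNat jn))).length) =
      List.replicate (n + 1) (k.toNat + 1) := by
    rw [replicate_eq_map_range]
    apply map_range_congr
    intro t _
    simp
  rw [h, List.sum_replicate, smul_eq_mul]

lemma filter_length_le {α : Type} (l : List α) (P P' : α → Bool)
    (himp : ∀ x, P' x = true → P x = true) :
    (l.filter P').length ≤ (l.filter P).length := by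
  induction l with
  | nil => simp
  | cons a t ih =>
    by_cases hp' : P' a = true
    · rw [List.filter_cons_of_pos hp', List.filter_cons_of_pos (himp a hp')]
      simpa using ih
    · rw [List.filter_cons_of_neg (by simpa using hp')]
      by_cases hp : P a = true
      · rw [List.filter_cons_of_pos hp]; simp; omega
      · rw [List.filter_cons_of_neg (by simpa using hp)]; exact ih

lemma filter_length_lt {α : Type} (l : List α) (P P' : α → Bool) (s : α)
    (hmem : s ∈ l) (h1 : P s = true) (h2 : P' s = false)
    (himp : ∀ x, P' x = true → P x = true) :
    (l.filter P').length < (l.filter P).length := by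
  induction l with
  | nil => simp at hmem
  | cons a t ih =>
    rcases List.mem_cons.mp hmem with rfl | hmem'
    · rw [List.filter_cons_of_neg (by simp [h2]), List.filter_cons_of_pos h1]
      have := filter_length_le t P P' himp
      simp; omega
    · by_cases hp' : P' a = true
      · rw [List.filter_cons_of_pos hp', List.filter_cons_of_pos (himp a hp')]
        simpa using ih hmem'
      · rw [List.filter_cons_of_neg (by simpa using hp')]
        by_cases hp : P a = true
        · rw [List.filter_cons_of_pos hp]
          have := ih hmem'
          simp; omega
        · rw [List.filter_cons_of_neg (by simpa using hp)]; exact ih hmem'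

lemma nodup_subset_length_le {α : Type} [DecidableEq α] {l m : List α}
    (hl : l.Nodup) (hsub : ∀ x ∈ l, x ∈ m) : l.length ≤ m.length :=
  calc l.length = l.toFinset.card := (List.toFinset_card_of_nodup hl).symm
    _ ≤ m.toFinset.card := Finset.card_le_card (by
        intro x hx
        exact List.mem_toFinset.mpr (hsub x (List.mem_toFinset.mp hx)))
    _ ≤ m.length := m.toFinset_card_le

lemma contains_false_get?_none {d : PySem.Dict (Nat × Int) Int} {s : Nat × Int}
    (h : d.contains s = false) : d.get? s = none := by
  rw [PySem.Dict.contains_eq_isSome_get?] at h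
  exact Option.not_isSome_iff_eq_none.mp (by simp [h])

lemma contains_true_get?_some {d : PySem.Dict (Nat × Int) Int} {s : Nat × Int}
    (h : ¬ d.contains s = false) : ∃ v, d.get? s = some v := by
  rw [PySem.Dict.contains_eq_isSome_get?] at h
  cases hs : d.get? s with
  | none => rw [hs] at h; simp at h
  | some v => exact ⟨v, rfl⟩

-- unmem strictly drops when a fresh reachable state is memoised
lemma unmem_insert_lt (n : Nat) (k : Int) (memo : PySem.Dict (Nat × Int) Int)
    (s : Nat × Int) (v : Int) (hmem : s ∈ allStates n k) (hnone : memo.get? s = none) :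
    unmem n k (memo.insert s v) < unmem n k memo := by
  apply filter_length_lt _ _ _ s hmem
  · simp [hnone]
  · simp [PySem.Dict.get?_insert_self]
  · intro x hx
    by_cases hxs : x = s
    · subst hxs; simp [PySem.Dict.get?_insert_self] at hx
    · rwa [PySem.Dict.get?_insert_of_ne _ _ hxs] at hx

-- main lemma: with enough fuel the loop ends with a memo that is correct on
-- every key and defined at the root
lemma bLoop_good (es : List (Int × Int × Int)) (ends : List Int)
    (hends : ends = es.map (fun e => e.2.1)) (n : Nat) (k : Int) :
    ∀ fuel stack memo, BInv es n k stack memo →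
      ((allStates n k).length + 2) * unmem n k memo + ((allStates n k).length + 2) ≤
        fuel + stack.length →
      (∀ s v, (bLoop es ends fuel stack memo).get? s = some v → v = F es s.1 s.2.toNat) ∧
      ((bLoop es ends fuel stack memo).get? (n, k)).isSome := by
  intro fuel
  set S := (allStates n k).length with hS
  induction fuel with
  | zero =>
    intro stack memo hinv hfuel
    exfalso
    obtain ⟨h1, h2, h3, h4, h5⟩ := hinv
    have hnd : stack.Nodup := h1.imp (fun {a b} hab => by
      intro hab'; subst hab'; exact absurd hab (lt_irrefl _))
    have hlen : stack.length ≤ S :=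
      nodup_subset_length_le hnd (fun x hx => mem_allStates_of_StOK n k x (h3 x hx))
    omega
  | succ fuel ih =>
    intro stack memo hinv hfuel
    obtain ⟨h1, h2, h3, h4, h5⟩ := hinv
    match stack with
    | [] =>
      refine ⟨h4, ?_⟩
      rcases h5 with h5 | h5
      · simp at h5
      · exact h5
    | (i, j) :: rest =>
      obtain ⟨hhead, htail⟩ := List.pairwise_cons.mp h1
      have hne_rest : ∀ s ∈ rest, s ≠ (i, j) := by
        intro s hs hcontra
        subst hcontra
        exact absurd (hhead _ hs) (lt_irrefl _)
      have hokij := h3 (i, j) List.mem_cons_self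
      have hij_n : i ≤ n := by
        rcases hokij with h | ⟨h, _, _⟩
        · simp only [Prod.mk.injEq] at h; omega
        · exact h
      have hnone_ij : memo.get? (i, j) = none := h2 (i, j) List.mem_cons_self
      have hmem_ij : (i, j) ∈ allStates n k := mem_allStates_of_StOK n k _ hokij
      -- shared re-establishment of BInv after memoising the top with a correct value
      have hafter : ∀ val : Int, val = F es i j.toNat →
          BInv es n k rest (memo.insert (i, j) val) := by
        intro val hval
        refine ⟨htail, ?_, fun s hs => h3 s (List.mem_cons_of_mem _ hs), ?_, ?_⟩
        · intro s hs
          rw [PySem.Dict.get?_insert_of_ne _ _ (hne_rest s hs)]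
          exact h2 s (List.mem_cons_of_mem _ hs)
        · intro s v hv
          by_cases hsij : s = (i, j)
          · subst hsij
            rw [PySem.Dict.get?_insert_self] at hv
            cases hv
            exact hval
          · rw [PySem.Dict.get?_insert_of_ne _ _ hsij] at hv
            exact h4 s v hv
        · by_cases hnkij : (n, k) = (i, j)
          · right; rw [hnkij, PySem.Dict.get?_insert_self]; rfl
          · rcases h5 with h5 | h5
            · rcases List.mem_cons.mp h5 with h | h
              · exact absurd h hnkij
              · exact Or.inl h
            · right
              rwa [PySem.Dict.get?_insert_of_ne _ _ hnkij]
      have hfuel_pop : ∀ memo' : PySem.Dict (Nat × Int) Int,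
          unmem n k memo' < unmem n k memo →
          (S + 2) * unmem n k memo' + (S + 2) ≤ fuel + rest.length := by
        intro memo' hlt
        have : (S + 2) * (unmem n k memo' + 1) ≤ (S + 2) * unmem n k memo :=
          Nat.mul_le_mul_left _ (by omega)
        have hexp : (S + 2) * unmem n k memo' + (S + 2) ≤ (S + 2) * unmem n k memo := by
          rw [Nat.mul_add, Nat.mul_one] at this
          omega
        simp only [List.length_cons] at hfuel
        omega
      rw [bLoop]
      by_cases hbase : i = 0 ∨ j ≤ 0
      · rw [if_pos hbase]
        apply ih rest (memo.insert (i, j) 0)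
        · apply hafter
          rcases hbase with h | h
          · subst h; rw [F_left_zero]
          · rw [show j.toNat = 0 by omega, F_right_zero]
        · exact hfuel_pop _ (unmem_insert_lt n k memo _ 0 hmem_ij hnone_ij)
      · rw [if_neg hbase]
        have hi1 : i ≠ 0 := fun h => hbase (Or.inl h)
        have hj1 : ¬ j ≤ 0 := fun h => hbase (Or.inr h)
        have hi : 1 ≤ i := Nat.one_le_iff_ne_zero.mpr hi1
        have hj : 1 ≤ j := by omega
        have hjk : j ≤ k := by
          rcases hokij with h | ⟨_, _, h⟩
          · simp only [Prod.mk.injEq] at h; omega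
          · exact h
        simp only []
        set e := PySem.List.pyGetD es ((i : Int) - 1) (0, 0, 0) with he
        set p := PySem.List.bisectRight ends (e.1 - 1) with hp
        set q := if p ≤ i then p else 0 with hq
        have hq_le : q ≤ i := by rw [hq]; split <;> omega
        -- the state read off the event equals the recurrence's ingredients
        have he' : e = es.getD (i - 1) (0, 0, 0) := by
          rw [he, show ((i : Int) - 1) = ((i - 1 : Nat) : Int) by omega,
            PySem.List.pyGetD_natCast]
        have hpF : p = pF es (i - 1) := by
          rw [hp, hends, he']
          rfl
        have hqF : q = qF es (i - 1) := by
          rw [hq, hpF, qF, show i - 1 + 1 = i by omega]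
        by_cases hm1 : memo.contains (i - 1, j) = false
        · rw [if_pos hm1]
          apply ih
          · refine ⟨?_, ?_, ?_, h4, ?_⟩
            · refine List.pairwise_cons.mpr ⟨?_, h1⟩
              intro b hb
              have hrk : stRank n (i - 1, j) < stRank n (i, j) := by
                simp only [stRank]
                omega
              rcases List.mem_cons.mp hb with rfl | hb'
              · exact hrk
              · exact lt_trans hrk (hhead b hb')
            · intro s hs
              rcases List.mem_cons.mp hs with rfl | hs'
              · exact contains_false_get?_none hm1
              · exact h2 s hs'
            · intro s hs
              rcases List.mem_cons.mp hs with rfl | hs'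
              · right
                refine ⟨by omega, by omega, ?_⟩
                rcases hokij with h | ⟨_, _, h⟩
                · simp only [Prod.mk.injEq] at h; omega
                · exact h
              · exact h3 s hs'
            · rcases h5 with h5 | h5
              · exact Or.inl (List.mem_cons_of_mem _ h5)
              · exact Or.inr h5
          · simp only [List.length_cons] at hfuel ⊢
            omega
        · rw [if_neg hm1]
          by_cases hm2 : memo.contains (q, j - 1) = false
          · rw [if_pos hm2]
            apply ih
            · refine ⟨?_, ?_, ?_, h4, ?_⟩
              · refine List.pairwise_cons.mpr ⟨?_, h1⟩
                intro b hb
                have hjt : (j - 1).toNat = j.toNat - 1 := by omega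
                have hjt1 : 1 ≤ j.toNat := by omega
                have hmul : (n + 1) ≤ j.toNat * (n + 1) :=
                  Nat.le_mul_of_pos_left _ (by omega)
                have hrk : stRank n (q, j - 1) < stRank n (i, j) := by
                  simp only [stRank, hjt]
                  rw [Nat.sub_mul, Nat.one_mul]
                  omega
                rcases List.mem_cons.mp hb with rfl | hb'
                · exact hrk
                · exact lt_trans hrk (hhead b hb')
              · intro s hs
                rcases List.mem_cons.mp hs with rfl | hs'
                · exact contains_false_get?_none hm2
                · exact h2 s hs'
              · intro s hs
                rcases List.mem_cons.mp hs with rfl | hs'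
                · exact Or.inr ⟨by omega, by omega, by omega⟩
                · exact h3 s hs'
              · rcases h5 with h5 | h5
                · exact Or.inl (List.mem_cons_of_mem _ h5)
                · exact Or.inr h5
            · simp only [List.length_cons] at hfuel ⊢
              omega
          · rw [if_neg hm2]
            obtain ⟨v1, hv1⟩ := contains_true_get?_some hm1
            obtain ⟨v2, hv2⟩ := contains_true_get?_some hm2
            have hv1F : v1 = F es (i - 1) j.toNat := h4 _ _ hv1
            have hv2F : v2 = F es q (j - 1).toNat := h4 _ _ hv2
            have hgd1 : memo.getD (i - 1, j) 0 = v1 := PySem.Dict.getD_of_get?_eq_some _ _ hv1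
            have hgd2 : memo.getD (q, j - 1) 0 = v2 := PySem.Dict.getD_of_get?_eq_some _ _ hv2
            have hval : (if e.2.2 + memo.getD (q, j - 1) 0 > memo.getD (i - 1, j) 0
                then e.2.2 + memo.getD (q, j - 1) 0 else memo.getD (i - 1, j) 0) =
                F es i j.toNat := by
              rw [hgd1, hgd2, hv1F, hv2F]
              have hsc : e.2.2 = scF es (i - 1) := by rw [he']; rfl
              have hstep : F es i j.toNat =
                  pymax (F es (i - 1) j.toNat)
                    (scF es (i - 1) + F es (qF es (i - 1)) (j.toNat - 1)) := by
                rw [show i = (i - 1) + 1 by omega, show j.toNat = (j.toNat - 1) + 1 by omega]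
                rw [F_succ]
                congr 2
              rw [hstep, hsc, hqF, show (j - 1).toNat = j.toNat - 1 by omega, pymax]
              split_ifs <;> omega
            apply ih
            · exact hafter _ hval
            · exact hfuel_pop _ (unmem_insert_lt n k memo _ _ hmem_ij hnone_ij)

-- the wrapper feeds the loop enough fuel: B computes F at the root
lemma bLoop_run (es : List (Int × Int × Int)) (k : Int) :
    (bLoop es (es.map (fun e => e.2.1))
        (((es.length + 1) * (k.toNat + 1) + 1 + 2) * ((es.length + 1) * (k.toNat + 1) + 1 + 2))
        [(es.length, k)] PySem.Dict.empty).getD (es.length, k) 0 = F es es.length k.toNat := by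
  set n := es.length with hn
  set S0 := (n + 1) * (k.toNat + 1) + 1 with hS0
  have hSlen : S0 = (allStates n k).length := (allStates_length n k).symm
  have hinit : BInv es n k [(n, k)] PySem.Dict.empty := by
    refine ⟨List.pairwise_singleton _ _, ?_, ?_, ?_, Or.inl List.mem_cons_self⟩
    · intro s _; exact PySem.Dict.get?_empty _
    · intro s hs
      rcases List.mem_cons.mp hs with rfl | hs'
      · exact Or.inl rfl
      · simp at hs'
    · intro s v hv
      rw [PySem.Dict.get?_empty] at hv
      cases hv
  have hU0 : unmem n k (PySem.Dict.empty : PySem.Dict (Nat × Int) Int) =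
      (allStates n k).length := by
    unfold unmem
    rw [List.filter_eq_self.mpr]
    intro a _
    simp [PySem.Dict.get?_empty]
  have hbound : ((allStates n k).length + 2) * unmem n k (PySem.Dict.empty : PySem.Dict (Nat × Int) Int) +
      ((allStates n k).length + 2) ≤ (S0 + 2) * (S0 + 2) + ([((n : Nat), k)] : List (Nat × Int)).length := by
    rw [hU0, ← hSlen]
    have h2 : (S0 + 2) * (S0 + 1) ≤ (S0 + 2) * (S0 + 2) := Nat.mul_le_mul_left _ (by omega)
    have h3 : (S0 + 2) * S0 + (S0 + 2) = (S0 + 2) * (S0 + 1) := by ring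
    simp only [List.length_cons, List.length_nil]
    omega
  obtain ⟨hcorr, hsome⟩ :=
    bLoop_good es (es.map (fun e => e.2.1)) rfl n k ((S0 + 2) * (S0 + 2)) [(n, k)]
      PySem.Dict.empty hinit hbound
  obtain ⟨v, hv⟩ := Option.isSome_iff_exists.mp hsome
  rw [PySem.Dict.getD_of_get?_eq_some _ _ hv]
  exact hcorr (n, k) v hv

lemma alt_eq_F (events : List (Int × Int × Int)) (k : Int) :
    maxKEvents_alt events k =
      F (PySem.List.sorted events (fun e => e.2.1))
        (PySem.List.sorted events (fun e => e.2.1)).length k.toNat := by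
  unfold maxKEvents_alt
  exact bLoop_run (PySem.List.sorted events (fun e => e.2.1)) k

-- ===== VERDICT (by name: the statement is the Claim_ definition above) =====
theorem maxKEvents_spec : Claim_equal_maxKEvents := by
  intro events k _ hpre
  unfold Pre_maxKEvents at hpre
  obtain ⟨K, rfl⟩ : ∃ K : Nat, k = (K : Int) := ⟨k.toNat, (Int.toNat_of_nonneg hpre).symm⟩
  unfold Spec_maxKEvents
  set es := PySem.List.sorted events (fun x => x.2.1) with hes
  set n := es.length with hn
  have hlen : events.length = n := (PySem.List.length_sorted _ _ _).symm
  have hK1 : ((K : Int) + 1).toNat = K + 1 := by omega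
  have hinit : List.replicate (n + 1) (List.replicate (K + 1) (0 : Int)) = dpSt es K n 0 := by
    unfold dpSt
    rw [replicate_eq_map_range]
    apply map_range_congr
    intro t _
    match t with
    | 0 => exact (rowF_zero es K).symm
    | v + 1 => rfl
  have hAside : maxKEvents events (K : Int) = F es n K := by
    show PySem.List.pyGetD (PySem.List.pyGetD
        ((List.range events.length).foldl (outerA es (K : Int))
          (List.replicate (events.length + 1) (List.replicate ((K : Int) + 1).toNat 0)))
        ((events.length : Nat) : Int) []) ((K : Int)) 0 = F es n K
    rw [hlen, hK1, hinit, A_outer_range es K n hn n (le_refl n),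
      PySem.List.pyGetD_natCast, PySem.List.pyGetD_natCast,
      dpSt_getD es K n n n (by omega), if_pos (le_refl n)]
    unfold rowF
    rw [PySem.List.getD_map_range _ _ _ _ (by omega)]
  rw [hAside, alt_eq_F]
  rw [← hes, ← hn, Int.toNat_natCast]
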